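-- pv_equiv track=rewrite | github.com/philips-ni/ecfs | leetcode/296_best_meeting_point/python/best_meeting_point.py | getRowAndColL
-- ===== SOURCE A (Python) =====
-- def getRowAndColL(grid):
--     rowL = []
--     colL = []
--     for i in range(len(grid)):
--         for j in range(len(grid[i])):
--             if grid[i][j] == 1:
--                 rowL.append(i)
--                 colL.append(j)
--     return sorted(rowL), sorted(colL)
-- ===== SOURCE B (Python) =====
-- def getRowAndColL(grid):
--     # row indices come out ascending row-major; column indices come out
--     # ascending from a separate column-major pass, so no sorting is needed
--     rowL = [i for i, row in enumerate(grid) for v in row if v == 1]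
--     width = max(map(len, grid), default=0)
--     colL = [j for j in range(width) for row in grid if j < len(row) and row[j] == 1]
--     return rowL, colL
-- ===== Notes on version B (the rewrite author's own statement) =====
-- stated objective: alternative
-- what changed: A collects (i,j) pairs in one row-major double loop and then calls sorted() on both index lists; B never sorts: it emits row indices from a row-major pass (already ascending) and column indices from a separate column-major pass over j in range(max row length) (already ascending).
import Mathlib
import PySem

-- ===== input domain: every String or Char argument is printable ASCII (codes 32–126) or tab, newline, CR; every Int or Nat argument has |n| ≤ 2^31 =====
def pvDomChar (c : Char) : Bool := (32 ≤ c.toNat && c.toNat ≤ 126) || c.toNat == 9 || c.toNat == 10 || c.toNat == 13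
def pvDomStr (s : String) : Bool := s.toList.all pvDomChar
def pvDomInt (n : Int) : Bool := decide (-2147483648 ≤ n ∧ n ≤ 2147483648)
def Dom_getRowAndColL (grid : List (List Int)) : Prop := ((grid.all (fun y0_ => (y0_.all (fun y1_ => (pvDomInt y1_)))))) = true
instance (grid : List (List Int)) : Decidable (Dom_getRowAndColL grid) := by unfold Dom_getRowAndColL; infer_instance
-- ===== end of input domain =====

-- B drops both sorts: row indices are emitted by B's row-major pass already ascending, and
-- column indices by a separate column-major pass already ascending (objective: alternative).

-- ===== PORT A =====
def getRowAndColL (grid : List (List Int)) : List Int × List Int :=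
  let st : List Int × List Int :=
    (PySem.List.pyRange 0 grid.length 1).foldl
      (fun st i =>
        (PySem.List.pyRange 0 ((PySem.List.pyGetD grid i []).length) 1).foldl
          (fun st2 j =>
            if PySem.List.pyGetD (PySem.List.pyGetD grid i []) j 0 == 1 then
              (st2.1 ++ [i], st2.2 ++ [j])
            else st2)
          st)
      ([], [])
  (PySem.List.sorted st.1 (fun x => x) false, PySem.List.sorted st.2 (fun x => x) false)

-- ===== PORT B =====
-- 'j < len(row) and row[j] == 1' of B's column-major comprehension
def colHas (j : Nat) (row : List Int) : Option Int :=
  match row[j]? with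
  | some v => if v == 1 then some (j : Int) else none
  | none => none

def getRowAndColL_alt (grid : List (List Int)) : List Int × List Int :=
  let rowL := (PySem.List.enumerate grid).flatMap
      (fun p => p.2.filterMap (fun v => if v == 1 then some p.1 else none))
  let width := ((grid.map List.length).max?).getD 0
  let colL := (List.range width).flatMap (fun j => grid.filterMap (colHas j))
  (rowL, colL)

-- ===== PRECONDITION & SPEC =====
def Spec_getRowAndColL (grid : List (List Int)) (out : List Int × List Int) : Prop := out = getRowAndColL_alt grid
instance (grid : List (List Int)) (out : List Int × List Int) : Decidable (Spec_getRowAndColL grid out) := by unfold Spec_getRowAndColL; infer_instance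

-- ===== CLAIM (what is proved, stated in full; the proofs are below) =====
def Claim_equal_getRowAndColL : Prop := ∀ (grid : List (List Int)), Dom_getRowAndColL grid → Spec_getRowAndColL grid (getRowAndColL grid)

-- ===== LEMMAS AND PROOFS =====

-- the ascending list of column indices of 1-cells of a row, offset by s
def ones (row : List Int) (s : Int) : List Int :=
  (PySem.List.enumerate row s).filterMap (fun p => if p.2 == 1 then some p.1 else none)

def rowsFrom (grid : List (List Int)) (s : Int) : List Int :=
  (PySem.List.enumerate grid s).flatMap (fun p => (ones p.2 0).map (fun _ => p.1))

def colsFrom (grid : List (List Int)) (s : Int) : List Int :=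
  (PySem.List.enumerate grid s).flatMap (fun p => ones p.2 0)

theorem ones_cons (v : Int) (row : List Int) (s : Int) :
    ones (v :: row) s = (if v = 1 then [s] else []) ++ ones row (s + 1) := by
  simp [ones, PySem.List.enumerate_cons, List.filterMap_cons]
  split <;> simp_all

theorem inner_fold_enum (i : Int) (row : List Int) : ∀ (s : Int) (a b : List Int),
    (PySem.List.enumerate row s).foldl
      (fun st2 p => if p.2 == 1 then (st2.1 ++ [i], st2.2 ++ [p.1]) else st2) (a, b)
    = (a ++ (ones row s).map (fun _ => i), b ++ ones row s) := by
  induction row with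
  | nil => intro s a b; simp [ones]
  | cons v t ih =>
    intro s a b
    rw [PySem.List.enumerate_cons, ones_cons]
    simp only [beq_iff_eq] at ih ⊢
    by_cases hv : v = 1
    · simp [hv, ih]
    · simp [hv, ih]

theorem inner_fold (i : Int) (row : List Int) (a b : List Int) :
    (PySem.List.pyRange 0 row.length 1).foldl
      (fun st2 j => if PySem.List.pyGetD row j 0 == 1 then (st2.1 ++ [i], st2.2 ++ [j]) else st2) (a, b)
    = (a ++ (ones row 0).map (fun _ => i), b ++ ones row 0) := by
  have h := PySem.List.enumerate_eq_map_pyRange row (0 : Int)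
  simp only [PySem.List.len_eq] at h
  have h2 := inner_fold_enum i row 0 a b
  rw [h, List.foldl_map] at h2
  exact h2

theorem outer_fold (grid : List (List Int)) : ∀ (s : Int) (a b : List Int),
    (PySem.List.enumerate grid s).foldl
      (fun st p =>
        (PySem.List.pyRange 0 (p.2.length) 1).foldl
          (fun st2 j => if PySem.List.pyGetD p.2 j 0 == 1 then (st2.1 ++ [p.1], st2.2 ++ [j]) else st2) st)
      (a, b)
    = (a ++ rowsFrom grid s, b ++ colsFrom grid s) := by
  induction grid with
  | nil => intro s a b; simp [rowsFrom, colsFrom, PySem.List.enumerate_nil]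
  | cons r t ih =>
    intro s a b
    rw [PySem.List.enumerate_cons]
    simp only [List.foldl_cons]
    rw [inner_fold, ih]
    simp [rowsFrom, colsFrom, PySem.List.enumerate_cons]

theorem A_eq (grid : List (List Int)) :
    getRowAndColL grid
    = (PySem.List.sorted (rowsFrom grid 0) (fun x => x) false,
       PySem.List.sorted (colsFrom grid 0) (fun x => x) false) := by
  have h := PySem.List.enumerate_eq_map_pyRange grid ([] : List Int)
  simp only [PySem.List.len_eq] at h
  have h2 := outer_fold grid 0 [] []
  rw [h, List.foldl_map] at h2
  simp only [List.nil_append] at h2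
  simp only [getRowAndColL]
  exact congrArg (fun st : List Int × List Int =>
    (PySem.List.sorted st.1 (fun x => x) false, PySem.List.sorted st.2 (fun x => x) false)) h2

-- B's per-row comprehension is the constant-i image of ones
theorem filterMap_row (i : Int) (row : List Int) : ∀ (s : Int),
    row.filterMap (fun v => if v == 1 then some i else none) = (ones row s).map (fun _ => i) := by
  induction row with
  | nil => intro s; simp [ones]
  | cons v t ih =>
    intro s
    rw [ones_cons, List.filterMap_cons]
    simp only [beq_iff_eq] at ih ⊢
    by_cases hv : v = 1
    · simp [hv, ih (s + 1)]
    · simp [hv, ih (s + 1)]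

theorem rowB_eq (grid : List (List Int)) :
    (PySem.List.enumerate grid).flatMap
      (fun p => p.2.filterMap (fun v => if v == 1 then some p.1 else none))
    = rowsFrom grid 0 := by
  unfold rowsFrom
  apply List.flatMap_congr
  intro p _
  exact filterMap_row p.1 p.2 0

theorem pairwise_flatMap_key {α : Type} (l : List α) (f : α → List Int) (key : α → Int)
    (hl : l.Pairwise (fun a b => key a ≤ key b))
    (hf : ∀ a, ∀ x ∈ f a, x = key a) :
    (l.flatMap f).Pairwise (fun x y : Int => x ≤ y) := by
  induction l with
  | nil => simp
  | cons a t ih =>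
    rw [List.pairwise_cons] at hl
    rw [List.flatMap_cons]
    apply List.pairwise_append.mpr
    refine ⟨?_, ih hl.2, ?_⟩
    · apply List.pairwise_of_forall_mem_list
      intro x hx y hy
      rw [hf a x hx, hf a y hy]
    · intro x hx y hy
      obtain ⟨b, hb, hyb⟩ := List.mem_flatMap.mp hy
      rw [hf a x hx, hf b y hyb]
      exact hl.1 b hb

theorem rows_pairwise (grid : List (List Int)) :
    (rowsFrom grid 0).Pairwise (fun x y : Int => x ≤ y) := by
  unfold rowsFrom
  apply pairwise_flatMap_key _ _ (fun p => p.1)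
  · exact (PySem.List.pairwise_lt_enumerate grid 0).imp (fun h => le_of_lt h)
  · intro a x hx
    obtain ⟨y, _, rfl⟩ := List.mem_map.mp hx
    rfl

theorem colHas_eq_some (j : Nat) (row : List Int) (x : Int) :
    colHas j row = some x → x = (j : Int) ∧ row[j]? = some 1 := by
  unfold colHas
  cases hrow : row[j]? with
  | none => simp
  | some v =>
    by_cases hv : v = 1
    · simp [hv]; intro h; omega
    · simp [hv]

theorem colB_pairwise (grid : List (List Int)) (w : Nat) :
    ((List.range w).flatMap (fun j => grid.filterMap (colHas j))).Pairwise (fun x y : Int => x ≤ y) := by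
  apply pairwise_flatMap_key _ _ (fun j : Nat => (j : Int))
  · refine List.Pairwise.imp ?_ List.pairwise_lt_range
    intro a b h
    exact_mod_cast Nat.le_of_lt h
  · intro j x hx
    obtain ⟨row, _, hr⟩ := List.mem_filterMap.mp hx
    exact (colHas_eq_some j row x hr).1

-- counting
theorem count_ones (row : List Int) : ∀ (s m : Int),
    (ones row s).count m = if s ≤ m ∧ row[(m - s).toNat]? = some 1 then 1 else 0 := by
  induction row with
  | nil => intro s m; simp [ones]
  | cons v t ih =>
    intro s m
    rw [ones_cons, List.count_append, ih (s + 1) m]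
    by_cases hm : m = s
    · subst hm
      have h0 : (m - m).toNat = 0 := by omega
      have h1 : ¬ (m + 1 ≤ m) := by omega
      rw [h0]
      by_cases hv : v = 1
      · simp [hv, h1]
      · simp [hv, h1]
    · by_cases hsm : s ≤ m
      · have h1 : (m - s).toNat = (m - (s + 1)).toNat + 1 := by omega
        have h2 : s + 1 ≤ m := by omega
        rw [h1, List.getElem?_cons_succ]
        by_cases hv : v = 1
        · simp [hv, hsm, h2, List.count_cons, beq_iff_eq, hm, Ne.symm hm]
        · simp [hv, hsm, h2]
      · have h2 : ¬ (s + 1 ≤ m) := by omega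
        by_cases hv : v = 1
        · simp [hv, hsm, h2, List.count_cons, beq_iff_eq, hm, Ne.symm hm]
        · simp [hv, hsm, h2]

theorem count_flatMap_sum {α : Type} (l : List α) (f : α → List Int) (m : Int) :
    ((l.flatMap f).count m) = (l.map (fun a => (f a).count m)).sum := by
  induction l with
  | nil => simp
  | cons a t ih => simp [List.count_append, ih]

theorem colsFrom_cons (r : List Int) (t : List (List Int)) (s : Int) :
    colsFrom (r :: t) s = ones r 0 ++ colsFrom t (s + 1) := by
  simp [colsFrom, PySem.List.enumerate_cons]

theorem count_colsFrom (grid : List (List Int)) : ∀ (s m : Int),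
    (colsFrom grid s).count m
    = (grid.map (fun row => if 0 ≤ m ∧ row[m.toNat]? = some 1 then 1 else 0)).sum := by
  induction grid with
  | nil => intro s m; simp [colsFrom]
  | cons r t ih =>
    intro s m
    rw [colsFrom_cons, List.count_append, ih (s + 1) m, List.map_cons, List.sum_cons]
    congr 1
    rw [count_ones r 0 m]
    simp

theorem count_block (j : Nat) (m : Int) (grid : List (List Int)) :
    ((grid.filterMap (colHas j)).count m)
    = if m = (j : Int) then grid.countP (fun row => row[j]? == some 1) else 0 := by
  induction grid with
  | nil => simp
  | cons row t ih =>
    rw [List.filterMap_cons]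
    cases hrow : colHas j row with
    | none =>
      have hP : (row[j]? == some 1) = false := by
        unfold colHas at hrow
        cases h : row[j]? with
        | none => simp [h]
        | some v =>
          rw [h] at hrow
          by_cases hv : v = 1
          · rw [hv] at hrow; simp at hrow
          · simp [h, hv]
      simp [ih, List.countP_cons, hP]
    | some x =>
      obtain ⟨rfl, h1⟩ := colHas_eq_some j row x hrow
      have hP : (row[j]? == some 1) = true := by simp [h1]
      rw [List.count_cons, ih]
      simp only [List.countP_cons, hP, if_true]
      by_cases hm : m = (j : Int)
      · simp [hm]
      · simp [hm, Ne.symm hm]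

theorem sum_map_range_ite (m : Int) (C : Nat → Nat) : ∀ (w : Nat),
    ((List.range w).map (fun j : Nat => if m = (j : Int) then C j else 0)).sum
    = if 0 ≤ m ∧ m.toNat < w then C m.toNat else 0 := by
  intro w
  induction w with
  | zero =>
    have h : ¬ (0 ≤ m ∧ m.toNat < 0) := by omega
    simp [h]
  | succ n ih =>
    rw [List.range_succ, List.map_append, List.sum_append, ih]
    by_cases hm : m = (n : Int)
    · subst hm
      have h1 : ¬ ((0:Int) ≤ (n : Int) ∧ ((n : Int)).toNat < n) := by omega
      have h3 : ((n : Int)).toNat = n := by omega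
      simp [h1, h3]
    · have hadd : ((List.map (fun j : Nat => if m = (j : Int) then C j else 0) [n]).sum) = 0 := by
        simp [hm]
      rw [hadd, Nat.add_zero]
      by_cases hc : 0 ≤ m ∧ m.toNat < n
      · rw [if_pos hc, if_pos ⟨hc.1, by omega⟩]
      · rw [if_neg hc, if_neg (by omega)]

theorem le_foldl_max (l : List Nat) : ∀ (acc : Nat),
    (∀ a ∈ l, a ≤ l.foldl max acc) ∧ acc ≤ l.foldl max acc := by
  induction l with
  | nil => intro acc; simp
  | cons x t ih =>
    intro acc
    refine ⟨?_, ?_⟩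
    · intro a ha
      rcases List.mem_cons.mp ha with rfl | hat
      · exact le_trans (le_max_right acc a) ((ih (max acc a)).2)
      · exact (ih (max acc x)).1 a hat
    · exact le_trans (le_max_left acc x) ((ih (max acc x)).2)

theorem len_le_width (l : List Nat) (a : Nat) (ha : a ∈ l) : a ≤ l.max?.getD 0 := by
  cases l with
  | nil => simp at ha
  | cons x t =>
    have hmax : (x :: t).max? = some (t.foldl max x) := rfl
    rw [hmax, Option.getD_some]
    rcases List.mem_cons.mp ha with rfl | hat
    · exact (le_foldl_max t a).2
    · exact (le_foldl_max t x).1 a hat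

theorem sum_ite_eq_countP (grid : List (List Int)) (P : List Int → Prop) [DecidablePred P] :
    (grid.map (fun row => if P row then 1 else 0)).sum = grid.countP (fun row => decide (P row)) := by
  induction grid with
  | nil => simp
  | cons row t ih =>
    rw [List.map_cons, List.sum_cons, List.countP_cons, ih]
    by_cases h : P row
    · simp [h]; omega
    · simp [h]

theorem count_colB (grid : List (List Int)) (m : Int) :
    (((List.range (((grid.map List.length).max?).getD 0)).flatMap
        (fun j => grid.filterMap (colHas j))).count m)
    = (colsFrom grid 0).count m := by
  set w := ((grid.map List.length).max?).getD 0 with hw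
  rw [count_flatMap_sum, count_colsFrom grid 0 m]
  have h1 : ((List.range w).map (fun j => (grid.filterMap (colHas j)).count m)).sum
      = if 0 ≤ m ∧ m.toNat < w then grid.countP (fun row => row[m.toNat]? == some 1) else 0 := by
    rw [← sum_map_range_ite m (fun j => grid.countP (fun row => row[j]? == some 1)) w]
    congr 1
    apply List.map_congr_left
    intro j _
    exact count_block j m grid
  rw [h1]
  by_cases hm : 0 ≤ m
  · by_cases hlt : m.toNat < w
    · rw [if_pos ⟨hm, hlt⟩]
      have hmap : (grid.map (fun row => if 0 ≤ m ∧ row[m.toNat]? = some 1 then 1 else 0))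
          = grid.map (fun row => if row[m.toNat]? = some 1 then 1 else 0) := by
        apply List.map_congr_left
        intro row _
        simp [hm]
      rw [hmap, sum_ite_eq_countP]
      apply List.countP_congr
      intro row _
      simp
    · rw [if_neg (fun h => hlt h.2)]
      symm
      apply List.sum_eq_zero
      intro x hx
      obtain ⟨row, hr, rfl⟩ := List.mem_map.mp hx
      have hlen : row.length ≤ w := by
        rw [hw]
        exact len_le_width (grid.map List.length) row.length (List.mem_map.mpr ⟨row, hr, rfl⟩)
      have hnone : row[m.toNat]? = none := by
        apply List.getElem?_eq_none
        omega
      simp [hnone]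
  · rw [if_neg (fun h => hm h.1)]
    symm
    apply List.sum_eq_zero
    intro x hx
    obtain ⟨row, hr, rfl⟩ := List.mem_map.mp hx
    simp [hm]

theorem colB_perm (grid : List (List Int)) :
    ((List.range (((grid.map List.length).max?).getD 0)).flatMap
        (fun j => grid.filterMap (colHas j))).Perm (colsFrom grid 0) := by
  rw [List.perm_iff_count]
  intro m
  exact count_colB grid m

-- ===== VERDICT (by name: the statement is the Claim_ definition above) =====
theorem getRowAndColL_spec : Claim_equal_getRowAndColL := by
  intro grid _
  unfold Spec_getRowAndColL
  rw [A_eq]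
  simp only [getRowAndColL_alt, Prod.mk.injEq]
  refine ⟨?_, ?_⟩
  · rw [rowB_eq grid]
    exact PySem.List.sorted_eq_self_of_pairwise _ _ (rows_pairwise grid)
  · exact PySem.List.sorted_id_eq_of_perm_of_pairwise _ _ (colB_perm grid) (colB_pairwise grid _)
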